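-- pv_equiv track=rewrite | github.com/yqyang733/Cycpep_VEGF | package/GetDescriptors.py | make_bond_dict
-- ===== SOURCE A (Python) =====
-- def make_bond_dict(ligand_bonds, protein_bonds):
--
--     ligand_start_end, protein_start_end = dict(), dict()
--
--     for i in ligand_bonds.keys():
--         start = i[0]
--         end = i[1]
--
--         if start in ligand_start_end:
--             ligand_start_end[start].append(end)
--
--         else:
--             ligand_start_end[start] = [end]
--
--     for i in protein_bonds.keys():
--         start = i[0]
--         end = i[1]
--
--         if start in protein_start_end:
--             protein_start_end[start].append(end)
--         else:
--             protein_start_end[start] = [end]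
--
--     return ligand_start_end, protein_start_end
-- ===== SOURCE B (Python) =====
-- def make_bond_dict(ligand_bonds, protein_bonds):
--     def group(bonds):
--         keys = list(bonds)
--         return {s: [k[1] for k in keys if k[0] == s]
--                 for s in dict.fromkeys(k[0] for k in keys)}
--     return group(ligand_bonds), group(protein_bonds)
-- ===== Notes on version B (the rewrite author's own statement) =====
-- stated objective: alternative
-- what changed: Replaces A's single-pass membership-test accumulation dict with a two-phase pass: ordered dedup of start nodes via dict.fromkeys, then one comprehension per start collecting its endpoints from the key list. (Pre_ excludes only association lists with a repeated (start,end) key, which encode no Python dict input).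
import Mathlib
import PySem

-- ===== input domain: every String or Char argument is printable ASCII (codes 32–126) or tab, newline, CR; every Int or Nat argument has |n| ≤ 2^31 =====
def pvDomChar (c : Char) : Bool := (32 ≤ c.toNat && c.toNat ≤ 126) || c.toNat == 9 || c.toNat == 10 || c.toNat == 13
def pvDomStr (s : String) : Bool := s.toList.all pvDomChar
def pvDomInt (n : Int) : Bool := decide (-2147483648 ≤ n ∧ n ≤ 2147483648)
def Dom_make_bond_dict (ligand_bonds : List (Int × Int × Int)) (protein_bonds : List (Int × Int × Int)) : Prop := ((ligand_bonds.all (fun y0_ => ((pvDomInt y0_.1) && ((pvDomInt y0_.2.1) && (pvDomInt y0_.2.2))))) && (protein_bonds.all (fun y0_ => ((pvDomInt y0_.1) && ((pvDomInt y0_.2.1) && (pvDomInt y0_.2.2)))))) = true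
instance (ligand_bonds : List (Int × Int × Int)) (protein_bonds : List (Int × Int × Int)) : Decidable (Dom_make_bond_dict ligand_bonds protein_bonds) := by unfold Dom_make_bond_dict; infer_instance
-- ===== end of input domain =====

-- B replaces A's single-pass membership-test accumulation with an ordered dedup of start
-- nodes followed by one endpoint-collecting scan per start (alternative decomposition, not faster).


-- ===== PORT A =====
-- A's loop over bonds.keys(): each key is ((start, end), value) flattened to (start, end, value);
-- 'if start in d: d[start].append(end) else: d[start] = [end]'.
def pvGroupA (bonds : List (Int × Int × Int)) : PySem.Dict Int (List Int) :=
  bonds.foldl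
    (fun d i =>
      if d.contains i.1 then d.modify i.1 [] (· ++ [i.2.1])
      else d.insert i.1 [i.2.1])
    PySem.Dict.empty

def make_bond_dict (ligand_bonds : List (Int × Int × Int)) (protein_bonds : List (Int × Int × Int)) : (List (Int × List Int)) × (List (Int × List Int)) :=
  ((pvGroupA ligand_bonds).items, (pvGroupA protein_bonds).items)

-- ===== PORT B =====
-- B: dict.fromkeys over the starts (ordered dedup), then one filtering comprehension per start.
def pvGroupB (bonds : List (Int × Int × Int)) : List (Int × List Int) :=
  (PySem.List.dedup (bonds.map (fun k => k.1))).map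
    (fun s => (s, (bonds.filter (fun k => k.1 == s)).map (fun k => k.2.1)))

def make_bond_dict_alt (ligand_bonds : List (Int × Int × Int)) (protein_bonds : List (Int × Int × Int)) : (List (Int × List Int)) × (List (Int × List Int)) :=
  (pvGroupB ligand_bonds, pvGroupB protein_bonds)

-- ===== PRECONDITION & SPEC =====
-- Pre_ excludes lists whose dict keys (start, end) repeat: a Python dict cannot hold duplicate
-- keys, so such lists do not encode any input A's dict parameters can take.
def Pre_make_bond_dict (ligand_bonds : List (Int × Int × Int)) (protein_bonds : List (Int × Int × Int)) : Prop :=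
  (ligand_bonds.map (fun i => (i.1, i.2.1))).Nodup ∧ (protein_bonds.map (fun i => (i.1, i.2.1))).Nodup
instance (ligand_bonds : List (Int × Int × Int)) (protein_bonds : List (Int × Int × Int)) : Decidable (Pre_make_bond_dict ligand_bonds protein_bonds) := by unfold Pre_make_bond_dict; infer_instance

def pvWitness_make_bond_dict : (List (Int × Int × Int)) × (List (Int × Int × Int)) :=
  ([(1, 2, 0), (1, 3, 0), (2, 5, 1)], [(4, 1, 2)])

def Spec_make_bond_dict (ligand_bonds : List (Int × Int × Int)) (protein_bonds : List (Int × Int × Int)) (out : (List (Int × List Int)) × (List (Int × List Int))) : Prop := out = make_bond_dict_alt ligand_bonds protein_bonds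
instance (ligand_bonds : List (Int × Int × Int)) (protein_bonds : List (Int × Int × Int)) (out : (List (Int × List Int)) × (List (Int × List Int))) : Decidable (Spec_make_bond_dict ligand_bonds protein_bonds out) := by unfold Spec_make_bond_dict; infer_instance

-- ===== CLAIM (what is proved, stated in full; the proofs are below) =====
def Claim_equal_make_bond_dict : Prop := ∀ (ligand_bonds : List (Int × Int × Int)) (protein_bonds : List (Int × Int × Int)), Dom_make_bond_dict ligand_bonds protein_bonds → Pre_make_bond_dict ligand_bonds protein_bonds → Spec_make_bond_dict ligand_bonds protein_bonds (make_bond_dict ligand_bonds protein_bonds)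

-- ===== LEMMAS AND PROOFS =====

-- A's branched loop body is exactly Dict.modify.
theorem pvStep_eq (d : PySem.Dict Int (List Int)) (i : Int × Int × Int) :
    (if d.contains i.1 then d.modify i.1 [] (· ++ [i.2.1]) else d.insert i.1 [i.2.1])
      = d.modify i.1 [] (· ++ [i.2.1]) := by
  by_cases h : d.contains i.1
  · simp [h]
  · simp only [Bool.not_eq_true] at h
    simp [h, PySem.Dict.modify, PySem.Dict.getD_of_not_contains d _ h]

-- A dict with Nodup keys is determined by its keys and getD.
theorem pvItems_eq (d : PySem.Dict Int (List Int)) (h : d.keys.Nodup) :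
    d.items = d.keys.map (fun k => (k, d.getD k [])) := by
  simp only [PySem.Dict.keys, List.map_map]
  symm
  calc d.items.map ((fun k => (k, d.getD k [])) ∘ (fun p => p.1))
      = d.items.map id := by
        apply List.map_congr_left
        intro p hp
        simp only [Function.comp, id]
        have := PySem.Dict.getD_of_mem_items (d := d) (k := p.1) (v := p.2) (by simpa using hp) h
        rw [this]
    _ = d.items := List.map_id _

theorem pvGroupA_eq (bonds : List (Int × Int × Int)) : (pvGroupA bonds).items = pvGroupB bonds := by
  unfold pvGroupA
  have hfun : (fun (d : PySem.Dict Int (List Int)) (i : Int × Int × Int) =>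
      if d.contains i.1 then d.modify i.1 [] (· ++ [i.2.1]) else d.insert i.1 [i.2.1])
      = fun d i => d.modify i.1 [] (· ++ [i.2.1]) := by
    funext d i; exact pvStep_eq d i
  rw [hfun]
  have hmap : ∀ (d : PySem.Dict Int (List Int)),
      bonds.foldl (fun d i => d.modify i.1 [] (· ++ [i.2.1])) d
        = (bonds.map (fun i => (i.1, i.2.1))).foldl (fun d p => d.modify p.1 [] (· ++ [p.2])) d := by
    intro d; rw [List.foldl_map]
  rw [hmap]
  set pairs := bonds.map (fun i => (i.1, i.2.1)) with hpairs
  set D := pairs.foldl (fun d p => d.modify p.1 [] (· ++ [p.2])) PySem.Dict.empty with hD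
  have hkeys : D.keys = PySem.List.dedup (bonds.map (fun k => k.1)) := by
    rw [hD, PySem.Dict.keys_foldl_modify_key pairs (fun p => p.1) [] (fun _ p v => v ++ [p.2])]
    have : pairs.map (fun p => p.1) = bonds.map (fun k => k.1) := by
      rw [hpairs, List.map_map]; rfl
    rw [PySem.Dict.keys_empty, PySem.Set.update_nil_left, this,
      PySem.List.dedup_eq_ofList]
  have hnodup : D.keys.Nodup := by
    rw [hkeys]; simp [PySem.List.dedup_eq_ofList]
  have hget : ∀ s : Int, D.getD s []
      = (bonds.filter (fun k => k.1 == s)).map (fun k => k.2.1) := by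
    intro s
    rw [hD, PySem.Dict.getD_foldl_modify_append pairs PySem.Dict.empty s]
    rw [PySem.Dict.getD_empty]
    rw [hpairs, List.filter_map, List.map_map]; rfl
  rw [pvItems_eq D hnodup, hkeys]
  unfold pvGroupB
  apply List.map_congr_left
  intro s _
  rw [hget s]

-- ===== VERDICT (by name: the statement is the Claim_ definition above) =====
theorem make_bond_dict_spec : Claim_equal_make_bond_dict := by
  intro l p _ _
  unfold Spec_make_bond_dict make_bond_dict make_bond_dict_alt
  rw [pvGroupA_eq l, pvGroupA_eq p]
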